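-- pv_equiv track=rewrite | github.com/ChrisKolios/CPS109_Fall2022 | Lab8/Quizzes/Quiz_Tuesday_SampleSoln.py | find_biggest_mult
-- ===== SOURCE A (Python) =====
-- def find_biggest_mult(L, M):
--     biggest_mult = L[0] * M[0]
--     i_index = 0
--     j_index = 0
--     for i in range(len(L)):
--         for j in range(len(M)):
--             if (L[i] * M[j] > biggest_mult):
--                 biggest_mult = L[i] * M[j]
--                 i_index = i
--                 j_index = j
--     return (i_index, j_index)
-- ===== SOURCE B (Python) =====
-- def find_biggest_mult(L, M):
--     # Closed form for the max product: it is attained at list extremes.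
--     lo_l, hi_l = min(L), max(L)
--     lo_m, hi_m = min(M), max(M)
--     best = max(lo_l * lo_m, lo_l * hi_m, hi_l * lo_m, hi_l * hi_m)
--     first = {}
--     for j, m in enumerate(M):
--         if m not in first:
--             first[m] = j
--     for i, l in enumerate(L):
--         if l == 0:
--             if best == 0:
--                 return (i, 0)
--         elif best % l == 0:
--             j = first.get(best // l)
--             if j is not None:
--                 return (i, j)
--     return (0, 0)  # unreachable: best is attained by some pair
-- ===== Notes on version B (the rewrite author's own statement) =====
-- stated objective: faster
-- what changed: B replaces A's exhaustive double loop over all index pairs by computing the maximum product in closed form from the four products of the lists' extremes (min/max of L and M) and then locating the first attaining pair with one scan of L plus a first-occurrence index dictionary for M.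
import Mathlib
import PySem

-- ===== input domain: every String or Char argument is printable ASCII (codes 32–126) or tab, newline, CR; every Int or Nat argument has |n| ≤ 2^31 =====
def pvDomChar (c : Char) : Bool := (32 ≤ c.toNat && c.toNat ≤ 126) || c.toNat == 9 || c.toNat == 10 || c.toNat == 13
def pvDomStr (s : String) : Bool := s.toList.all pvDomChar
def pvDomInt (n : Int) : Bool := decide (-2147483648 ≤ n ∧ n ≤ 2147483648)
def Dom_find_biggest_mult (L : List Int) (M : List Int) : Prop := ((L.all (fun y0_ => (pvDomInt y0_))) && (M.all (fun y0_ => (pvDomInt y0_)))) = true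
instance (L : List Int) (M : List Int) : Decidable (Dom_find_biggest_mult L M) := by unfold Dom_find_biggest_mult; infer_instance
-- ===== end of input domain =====

-- B replaces A's O(n*m) double loop by an O(n+m) computation: the maximum product is a
-- max of the four products of list extremes, and the first attaining pair is found by a
-- single scan of L with a first-occurrence index dictionary for M.  (objective: faster)

-- ===== PORT A =====
def find_biggest_mult (L : List Int) (M : List Int) : List Int :=
  match PySem.List.pyGet? L 0, PySem.List.pyGet? M 0 with
  | some l0, some m0 =>
    let st :=
      (PySem.List.pyRange 0 (L.length : Int) 1).foldl (fun st i =>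
        (PySem.List.pyRange 0 (M.length : Int) 1).foldl (fun st j =>
          if PySem.List.pyGetD L i 0 * PySem.List.pyGetD M j 0 > st.1 then
            (PySem.List.pyGetD L i 0 * PySem.List.pyGetD M j 0, i, j)
          else st) st)
        ((l0 * m0, 0, 0) : Int × Int × Int)
    [st.2.1, st.2.2]
  | _, _ => []  -- IndexError: excluded by Pre_

-- ===== PORT B =====
-- first-occurrence index dictionary for M  (``for j, m in enumerate(M): if m not in first: first[m] = j``)
def pvAltFirst (M : List Int) : PySem.Dict Int Int :=
  (PySem.List.enumerate M 0).foldl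
    (fun d p => if d.contains p.2 then d else d.insert p.2 p.1) PySem.Dict.empty

-- the ``for i, l in enumerate(L)`` loop with its early returns
def pvAltSearch (best : Int) (first : PySem.Dict Int Int) :
    List (Int × Int) → Option (Int × Int)
  | [] => none
  | (i, l) :: rest =>
    if l = 0 then
      if best = 0 then some (i, 0) else pvAltSearch best first rest
    else if PySem.Int.mod best l = 0 then
      match first.get? (PySem.Int.floordiv best l) with
      | some j => some (i, j)
      | none => pvAltSearch best first rest
    else pvAltSearch best first rest

def find_biggest_mult_alt (L : List Int) (M : List Int) : List Int :=
  match PySem.List.min? L (fun x => x) with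
  | none => []  -- ValueError on min of empty list: excluded by Pre_
  | some loL =>
    match PySem.List.max? L (fun x => x) with
    | none => []
    | some hiL =>
      match PySem.List.min? M (fun x => x) with
      | none => []
      | some loM =>
        match PySem.List.max? M (fun x => x) with
        | none => []
        | some hiM =>
          let best := max (max (max (loL * loM) (loL * hiM)) (hiL * loM)) (hiL * hiM)
          let first := pvAltFirst M
          match pvAltSearch best first (PySem.List.enumerate L 0) with
          | some (i, j) => [i, j]
          | none => [0, 0]  -- unreachable when best is attained

-- ===== PRECONDITION & SPEC =====
-- A evaluates L[0] and M[0] unconditionally, so it raises IndexError on an empty list.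
def Pre_find_biggest_mult (L : List Int) (M : List Int) : Prop := L ≠ [] ∧ M ≠ []
instance (L : List Int) (M : List Int) : Decidable (Pre_find_biggest_mult L M) := by
  unfold Pre_find_biggest_mult; infer_instance

def pvWitness_find_biggest_mult : List Int × List Int := ([2, -3], [-1, 4])

def Spec_find_biggest_mult (L : List Int) (M : List Int) (out : List Int) : Prop :=
  out = find_biggest_mult_alt L M
instance (L : List Int) (M : List Int) (out : List Int) :
    Decidable (Spec_find_biggest_mult L M out) := by
  unfold Spec_find_biggest_mult; infer_instance

-- ===== CLAIM (what is proved, stated in full; the proofs are below) =====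
def Claim_equal_find_biggest_mult : Prop :=
  ∀ (L : List Int) (M : List Int), Dom_find_biggest_mult L M →
    Pre_find_biggest_mult L M →
    Spec_find_biggest_mult L M (find_biggest_mult L M)

-- ===== LEMMAS AND PROOFS =====

-- the product of the pair p of indices (into L and M respectively)
def pvPr (L M : List Int) (p : Int × Int) : Int :=
  PySem.List.pyGetD L p.1 0 * PySem.List.pyGetD M p.2 0

-- A's loop body, on the flattened (row-major) list of index pairs
def pvStep (L M : List Int) (st : Int × Int × Int) (p : Int × Int) : Int × Int × Int :=
  if pvPr L M p > st.1 then (pvPr L M p, p.1, p.2) else st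

-- the row-major list of index pairs
def pvPairs (L M : List Int) : List (Int × Int) :=
  (PySem.List.pyRange 0 (L.length : Int) 1).flatMap
    (fun i => (PySem.List.pyRange 0 (M.length : Int) 1).map (fun j => (i, j)))

-- running maximum of products
def pvF (L M : List Int) (ps : List (Int × Int)) (b : Int) : Int :=
  ps.foldl (fun a p => max a (pvPr L M p)) b

theorem pvF_cons (L M : List Int) (p : Int × Int) (ps : List (Int × Int)) (b : Int) :
    pvF L M (p :: ps) b = pvF L M ps (max b (pvPr L M p)) := rfl

theorem pvF_ge_init (L M : List Int) : ∀ (ps : List (Int × Int)) (b : Int), b ≤ pvF L M ps b := by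
  intro ps
  induction ps with
  | nil => intro b; simp [pvF]
  | cons p ps ih =>
    intro b
    calc b ≤ max b (pvPr L M p) := le_max_left _ _
      _ ≤ pvF L M ps (max b (pvPr L M p)) := ih _
      _ = pvF L M (p :: ps) b := rfl

theorem pvF_ge_mem (L M : List Int) : ∀ (ps : List (Int × Int)) (b : Int) (p : Int × Int),
    p ∈ ps → pvPr L M p ≤ pvF L M ps b := by
  intro ps
  induction ps with
  | nil => intro b p hp; simp at hp
  | cons q ps ih =>
    intro b p hp
    rcases List.mem_cons.mp hp with h | h
    · subst h
      calc pvPr L M p ≤ max b (pvPr L M p) := le_max_right _ _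
        _ ≤ pvF L M ps _ := pvF_ge_init L M ps _
        _ = pvF L M (p :: ps) b := rfl
    · exact ih _ p h

theorem pvF_of_all_le (L M : List Int) : ∀ (ps : List (Int × Int)) (b : Int),
    (∀ p ∈ ps, pvPr L M p ≤ b) → pvF L M ps b = b := by
  intro ps
  induction ps with
  | nil => intro b _; rfl
  | cons q ps ih =>
    intro b h
    rw [pvF_cons, max_eq_left (h q (List.mem_cons_self))]
    exact ih b (fun p hp => h p (List.mem_cons_of_mem _ hp))

theorem pvF_mem_or (L M : List Int) : ∀ (ps : List (Int × Int)) (b : Int),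
    (∃ p ∈ ps, pvF L M ps b = pvPr L M p) ∨ pvF L M ps b = b := by
  intro ps
  induction ps with
  | nil => intro b; right; rfl
  | cons q ps ih =>
    intro b
    rw [pvF_cons]
    rcases ih (max b (pvPr L M q)) with ⟨p, hp, he⟩ | he
    · exact Or.inl ⟨p, List.mem_cons_of_mem _ hp, he⟩
    · by_cases h : pvPr L M q ≤ b
      · right; rw [he, max_eq_left h]
      · left
        exact ⟨q, List.mem_cons_self, by rw [he, max_eq_right (le_of_not_ge h)]⟩

theorem pvStep_fold_of_all_le (L M : List Int) : ∀ (ps : List (Int × Int)) (st : Int × Int × Int),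
    (∀ p ∈ ps, pvPr L M p ≤ st.1) → ps.foldl (pvStep L M) st = st := by
  intro ps
  induction ps with
  | nil => intro st _; rfl
  | cons q ps ih =>
    intro st h
    rw [List.foldl_cons]
    have hq : pvStep L M st q = st := by
      unfold pvStep; rw [if_neg (not_lt.mpr (h q List.mem_cons_self))]
    rw [hq]
    exact ih st (fun p hp => h p (List.mem_cons_of_mem _ hp))

-- if some product beats the seed, the fold's indices are the first pair attaining the max
theorem pvStep_fold_snd (L M : List Int) : ∀ (ps : List (Int × Int)) (st : Int × Int × Int),
    (∃ p ∈ ps, st.1 < pvPr L M p) →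
    ∃ q, ps.find? (fun p => pvPr L M p == pvF L M ps st.1) = some q ∧
      (ps.foldl (pvStep L M) st).2 = q := by
  intro ps
  induction ps with
  | nil => intro st h; simp at h
  | cons p ps ih =>
    intro st h
    rw [List.foldl_cons, pvF_cons]
    by_cases hp : st.1 < pvPr L M p
    · have hstep : pvStep L M st p = (pvPr L M p, p.1, p.2) := by
        unfold pvStep; rw [if_pos hp]
      rw [hstep]
      by_cases hrest : ∃ r ∈ ps, pvPr L M p < pvPr L M r
      · obtain ⟨q, hq1, hq2⟩ := ih (pvPr L M p, p.1, p.2) hrest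
        refine ⟨q, ?_, hq2⟩
        have hmax : max st.1 (pvPr L M p) = pvPr L M p := max_eq_right hp.le
        rw [hmax]
        obtain ⟨r, hr1, hr2⟩ := hrest
        have hgt : pvPr L M p < pvF L M ps (pvPr L M p) :=
          lt_of_lt_of_le hr2 (pvF_ge_mem L M ps _ r hr1)
        rw [List.find?_cons_of_neg (by simp [ne_of_lt hgt])]
        simpa using hq1
      · push_neg at hrest
        have hfold := pvStep_fold_of_all_le L M ps (pvPr L M p, p.1, p.2) (by simpa using hrest)
        rw [hfold]
        have hmax : max st.1 (pvPr L M p) = pvPr L M p := max_eq_right hp.le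
        rw [hmax, pvF_of_all_le L M ps _ hrest]
        exact ⟨p, by rw [List.find?_cons_of_pos (by simp)], rfl⟩
    · have hstep : pvStep L M st p = st := by
        unfold pvStep; rw [if_neg hp]
      rw [hstep]
      have hmax : max st.1 (pvPr L M p) = st.1 := max_eq_left (not_lt.mp hp)
      rw [hmax]
      have hex : ∃ r ∈ ps, st.1 < pvPr L M r := by
        obtain ⟨r, hr1, hr2⟩ := h
        rcases List.mem_cons.mp hr1 with he | he
        · exact absurd (he ▸ hr2) hp
        · exact ⟨r, he, hr2⟩
      obtain ⟨q, hq1, hq2⟩ := ih st hex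
      refine ⟨q, ?_, hq2⟩
      obtain ⟨r, hr1, hr2⟩ := hex
      have hgt : pvPr L M p < pvF L M ps st.1 :=
        lt_of_le_of_lt (not_lt.mp hp) (lt_of_lt_of_le hr2 (pvF_ge_mem L M ps _ r hr1))
      rw [List.find?_cons_of_neg (by simp [ne_of_lt hgt])]
      exact hq1

-- A as a single fold over the row-major pair list
theorem pvA_eq_pairs_fold (L M : List Int) (st : Int × Int × Int) :
    (PySem.List.pyRange 0 (L.length : Int) 1).foldl (fun st i =>
        (PySem.List.pyRange 0 (M.length : Int) 1).foldl (fun st j =>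
          if PySem.List.pyGetD L i 0 * PySem.List.pyGetD M j 0 > st.1 then
            (PySem.List.pyGetD L i 0 * PySem.List.pyGetD M j 0, i, j)
          else st) st) st
    = (pvPairs L M).foldl (pvStep L M) st := by
  unfold pvPairs
  rw [List.foldl_flatMap]
  congr 1
  funext st i
  rw [List.foldl_map]
  rfl


-- helper: find? respects pointwise-equal predicates
theorem pvFind_congr {α : Type} (p q : α → Bool) :
    ∀ (l : List α), (∀ x ∈ l, p x = q x) → l.find? p = l.find? q := by
  intro l
  induction l with
  | nil => intro _; rfl
  | cons x l ih =>
    intro h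
    have hx := h x List.mem_cons_self
    by_cases hp : p x = true
    · rw [List.find?_cons_of_pos hp, List.find?_cons_of_pos (hx ▸ hp)]
    · rw [List.find?_cons_of_neg hp, List.find?_cons_of_neg (hx ▸ hp)]
      exact ih (fun y hy => h y (List.mem_cons_of_mem _ hy))

-- the overall (seeded) maximum product
def pvK (L M : List Int) : Int := pvF L M (pvPairs L M) (pvPr L M (0, 0))

theorem pvPairs_eq_cons {L M : List Int} (hL : L ≠ []) (hM : M ≠ []) :
    ∃ tl, pvPairs L M = ((0 : Int), (0 : Int)) :: tl := by
  have hn : (0 : Int) < (L.length : Int) := by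
    have := List.length_pos_of_ne_nil hL; exact_mod_cast this
  have hm : (0 : Int) < (M.length : Int) := by
    have := List.length_pos_of_ne_nil hM; exact_mod_cast this
  unfold pvPairs
  rw [PySem.List.pyRange_one_cons hn, List.flatMap_cons, PySem.List.pyRange_one_cons hm,
    List.map_cons, List.cons_append]
  exact ⟨_, rfl⟩

theorem mem_pvPairs {L M : List Int} {p : Int × Int} :
    p ∈ pvPairs L M ↔
      0 ≤ p.1 ∧ p.1 < (L.length : Int) ∧ 0 ≤ p.2 ∧ p.2 < (M.length : Int) := by
  obtain ⟨i, j⟩ := p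
  unfold pvPairs
  rw [List.mem_flatMap]
  constructor
  · rintro ⟨a, ha, hmem⟩
    rw [List.mem_map] at hmem
    obtain ⟨b, hb, he⟩ := hmem
    rw [PySem.List.mem_pyRange_one] at ha hb
    obtain ⟨h1, h2⟩ := Prod.mk.injEq a b i j ▸ he
    subst h1; subst h2
    exact ⟨ha.1, ha.2, hb.1, hb.2⟩
  · rintro ⟨h1, h2, h3, h4⟩
    exact ⟨i, PySem.List.mem_pyRange_one.mpr ⟨h1, h2⟩,
      List.mem_map.mpr ⟨j, PySem.List.mem_pyRange_one.mpr ⟨h3, h4⟩, rfl⟩⟩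

theorem pvPairs_of_mem {L M : List Int} {a b : Int} (ha : a ∈ L) (hb : b ∈ M) :
    ∃ p ∈ pvPairs L M, pvPr L M p = a * b := by
  obtain ⟨i, hi, rfl⟩ := List.mem_iff_getElem.mp ha
  obtain ⟨j, hj, rfl⟩ := List.mem_iff_getElem.mp hb
  refine ⟨((i : Int), (j : Int)), mem_pvPairs.mpr ?_, ?_⟩
  · refine ⟨?_, ?_, ?_, ?_⟩
    · show (0 : Int) ≤ (i : Int); positivity
    · show (i : Int) < (L.length : Int); exact_mod_cast hi
    · show (0 : Int) ≤ (j : Int); positivity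
    · show (j : Int) < (M.length : Int); exact_mod_cast hj
  · unfold pvPr
    simp only [PySem.List.pyGetD_natCast]
    simp [List.getD_eq_getElem?_getD, hi, hj]

theorem pvK_attained {L M : List Int} (hL : L ≠ []) (hM : M ≠ []) :
    ∃ p ∈ pvPairs L M, pvK L M = pvPr L M p := by
  rcases pvF_mem_or L M (pvPairs L M) (pvPr L M (0, 0)) with h | h
  · obtain ⟨p, hp, he⟩ := h; exact ⟨p, hp, he⟩
  · obtain ⟨tl, he⟩ := pvPairs_eq_cons hL hM
    exact ⟨(0, 0), by rw [he]; exact List.mem_cons_self, h⟩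

-- four-extremes bound, pure arithmetic
theorem pv_prod_le (a b c d l m : Int) (h1 : a ≤ l) (h2 : l ≤ b) (h3 : c ≤ m) (h4 : m ≤ d) :
    l * m ≤ max (max (max (a * c) (a * d)) (b * c)) (b * d) := by
  have k1 : a * c ≤ max (max (max (a * c) (a * d)) (b * c)) (b * d) :=
    ((le_max_left _ _).trans (le_max_left _ _)).trans (le_max_left _ _)
  have k2 : a * d ≤ max (max (max (a * c) (a * d)) (b * c)) (b * d) :=
    ((le_max_right _ _).trans (le_max_left _ _)).trans (le_max_left _ _)
  have k3 : b * c ≤ max (max (max (a * c) (a * d)) (b * c)) (b * d) :=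
    (le_max_right _ _).trans (le_max_left _ _)
  have k4 : b * d ≤ max (max (max (a * c) (a * d)) (b * c)) (b * d) := le_max_right _ _
  rcases le_total 0 l with hl | hl
  · rcases le_total 0 d with hd | hd
    · exact le_trans (by nlinarith) k4
    · exact le_trans (by nlinarith) k2
  · rcases le_total 0 c with hc | hc
    · exact le_trans (by nlinarith) k3
    · exact le_trans (by nlinarith) k1

-- characterization of A: its result is the first row-major pair attaining the maximum
theorem pvA_char (L M : List Int) (hL : L ≠ []) (hM : M ≠ []) :
    ∃ q, (pvPairs L M).find? (fun p => pvPr L M p == pvK L M) = some q ∧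
      find_biggest_mult L M = [q.1, q.2] := by
  have h0L : L[0]? = some (L.getD 0 0) := by
    rw [List.getD_eq_getElem?_getD]
    cases h : L[0]? with
    | some x => rfl
    | none =>
      rw [List.getElem?_eq_none_iff] at h
      have := List.length_pos_of_ne_nil hL; omega
  have h0M : M[0]? = some (M.getD 0 0) := by
    rw [List.getD_eq_getElem?_getD]
    cases h : M[0]? with
    | some x => rfl
    | none =>
      rw [List.getElem?_eq_none_iff] at h
      have := List.length_pos_of_ne_nil hM; omega
  have hseed : L.getD 0 0 * M.getD 0 0 = pvPr L M (0, 0) := by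
    unfold pvPr
    simp [PySem.List.pyGetD_zero]
  unfold find_biggest_mult
  rw [PySem.List.pyGet?_zero, PySem.List.pyGet?_zero, h0L, h0M]
  simp only
  rw [pvA_eq_pairs_fold, hseed]
  by_cases hex : ∃ p ∈ pvPairs L M, pvPr L M (0, 0) < pvPr L M p
  · obtain ⟨q, hq1, hq2⟩ :=
      pvStep_fold_snd L M (pvPairs L M) (pvPr L M (0, 0), 0, 0) hex
    exact ⟨q, by simpa [pvK] using hq1, by rw [hq2]⟩
  · push_neg at hex
    rw [pvStep_fold_of_all_le L M (pvPairs L M) _ (fun p hp => hex p hp)]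
    have hKv : pvK L M = pvPr L M (0, 0) :=
      pvF_of_all_le L M (pvPairs L M) _ (fun p hp => hex p hp)
    obtain ⟨tl, he⟩ := pvPairs_eq_cons hL hM
    refine ⟨(0, 0), ?_, rfl⟩
    rw [he, List.find?_cons_of_pos (by simp [hKv])]

-- the first-occurrence dictionary really holds the first occurrence
theorem pvAltFirst_aux :
    ∀ (xs : List Int) (s : Int) (d : PySem.Dict Int Int) (v : Int),
    ((PySem.List.enumerate xs s).foldl
        (fun d p => if d.contains p.2 then d else d.insert p.2 p.1) d).get? v
    = (match d.get? v with
       | some w => some w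
       | none => ((PySem.List.enumerate xs s).find? (fun p => p.2 == v)).map (fun p => p.1)) := by
  intro xs
  induction xs with
  | nil =>
    intro s d v
    rw [PySem.List.enumerate_nil]
    cases h : d.get? v <;> simp [h]
  | cons x xs ih =>
    intro s d v
    rw [PySem.List.enumerate_cons, List.foldl_cons]
    have hred : (if d.contains ((s, x) : Int × Int).2 = true then d
        else d.insert ((s, x) : Int × Int).2 ((s, x) : Int × Int).1)
        = (if d.contains x = true then d else d.insert x s) := rfl
    rw [hred]
    by_cases hc : d.contains x = true
    · rw [if_pos hc, ih]
      cases hv : d.get? v with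
      | some w => simp
      | none =>
        have hxv : (x == v) = false := by
          by_cases hx : x = v
          · subst hx
            rw [PySem.Dict.get?_eq_none_iff_contains] at hv
            rw [hv] at hc; cases hc
          · simp [hx]
        simp only
        rw [List.find?_cons_of_neg (by simp [hxv])]
    · have hcf : d.contains x = false := by
        cases h : d.contains x
        · rfl
        · exact absurd h hc
      rw [if_neg hc, ih]
      by_cases hx : x = v
      · subst hx
        have h1 : (d.insert x s).get? x = some s := PySem.Dict.get?_insert_self d x s
        have h2 : d.get? x = none := by
          rw [PySem.Dict.get?_eq_none_iff_contains]; exact hcf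
        rw [h1, h2]
        simp only
        rw [List.find?_cons_of_pos (by simp)]
        rfl
      · have h1 : (d.insert x s).get? v = d.get? v :=
          PySem.Dict.get?_insert_of_ne d s (Ne.symm hx)
        rw [h1]
        cases hv : d.get? v with
        | some w => simp
        | none =>
          simp only
          rw [List.find?_cons_of_neg (by simp [hx])]

theorem pvAltFirst_get? (M : List Int) (v : Int) :
    (pvAltFirst M).get? v
    = (PySem.List.pyRange 0 (M.length : Int) 1).find?
        (fun j => PySem.List.pyGetD M j 0 == v) := by
  unfold pvAltFirst
  rw [pvAltFirst_aux M 0 PySem.Dict.empty v]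
  rw [PySem.Dict.get?_empty]
  simp only
  rw [PySem.List.enumerate_eq_map_pyRange M 0, PySem.List.len_eq, List.find?_map]
  rw [pvFind_congr ((fun p => p.2 == v) ∘ (fun j => (j, PySem.List.pyGetD M j 0)))
    (fun j => PySem.List.pyGetD M j 0 == v) _ (fun x _ => rfl)]
  cases hres : (PySem.List.pyRange 0 (M.length : Int) 1).find?
      (fun j => PySem.List.pyGetD M j 0 == v) with
  | none => rfl
  | some j => rfl

-- evaluating one row of the search
theorem pvRow_eval (L M : List Int) (K : Int) (hM : M ≠ []) (i : Int) :
    ((PySem.List.pyRange 0 (M.length : Int) 1).map (fun j => (i, j))).find?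
        (fun p => pvPr L M p == K)
    = (if PySem.List.pyGetD L i 0 = 0 then (if K = 0 then some (i, (0 : Int)) else none)
       else if PySem.Int.mod K (PySem.List.pyGetD L i 0) = 0 then
         (((PySem.List.pyRange 0 (M.length : Int) 1).find?
             (fun j => PySem.List.pyGetD M j 0 ==
               PySem.Int.floordiv K (PySem.List.pyGetD L i 0))).map (fun j => (i, j)))
       else none) := by
  have hm : (0 : Int) < (M.length : Int) := by
    have := List.length_pos_of_ne_nil hM; exact_mod_cast this
  rw [List.find?_map]
  by_cases hl : PySem.List.pyGetD L i 0 = 0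
  · rw [if_pos hl]
    by_cases hK : K = 0
    · rw [if_pos hK]
      rw [PySem.List.pyRange_one_cons hm]
      rw [List.find?_cons_of_pos (by simp [Function.comp, pvPr, hl, hK])]
      rfl
    · rw [if_neg hK]
      have : (PySem.List.pyRange 0 (M.length : Int) 1).find?
          ((fun p => pvPr L M p == K) ∘ (fun j => (i, j))) = none := by
        apply List.find?_eq_none.mpr
        intro j _
        simp [Function.comp, pvPr, hl]
        intro h; exact hK h.symm
      rw [this]; rfl
  · rw [if_neg hl]
    by_cases hd : PySem.Int.mod K (PySem.List.pyGetD L i 0) = 0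
    · rw [if_pos hd]
      have hKt : PySem.Int.floordiv K (PySem.List.pyGetD L i 0) * PySem.List.pyGetD L i 0 = K := by
        have h := PySem.Int.floordiv_mul_add_mod K (PySem.List.pyGetD L i 0)
        rw [hd] at h; linarith
      have hpred : ∀ j ∈ PySem.List.pyRange 0 (M.length : Int) 1,
          ((fun p => pvPr L M p == K) ∘ (fun j => (i, j))) j
          = (PySem.List.pyGetD M j 0 == PySem.Int.floordiv K (PySem.List.pyGetD L i 0)) := by
        intro j _
        by_cases hx : PySem.List.pyGetD M j 0 = PySem.Int.floordiv K (PySem.List.pyGetD L i 0)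
        · have hv : pvPr L M (i, j) = K := by
            unfold pvPr; rw [hx, mul_comm]; exact hKt
          show (pvPr L M (i, j) == K)
              = (PySem.List.pyGetD M j 0 == PySem.Int.floordiv K (PySem.List.pyGetD L i 0))
          simp [hv, hx]
        · have hv : ¬ pvPr L M (i, j) = K := by
            intro he
            apply hx
            have h2 : PySem.List.pyGetD L i 0 * PySem.List.pyGetD M j 0
                = PySem.List.pyGetD L i 0 * PySem.Int.floordiv K (PySem.List.pyGetD L i 0) := by
              calc PySem.List.pyGetD L i 0 * PySem.List.pyGetD M j 0 = K := he
                _ = PySem.Int.floordiv K (PySem.List.pyGetD L i 0) * PySem.List.pyGetD L i 0 :=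
                    hKt.symm
                _ = PySem.List.pyGetD L i 0 * PySem.Int.floordiv K (PySem.List.pyGetD L i 0) :=
                    mul_comm _ _
            exact mul_left_cancel₀ hl h2
          show (pvPr L M (i, j) == K)
              = (PySem.List.pyGetD M j 0 == PySem.Int.floordiv K (PySem.List.pyGetD L i 0))
          simp [hv, hx]
      rw [pvFind_congr _ _ _ hpred]
    · rw [if_neg hd]
      have : (PySem.List.pyRange 0 (M.length : Int) 1).find?
          ((fun p => pvPr L M p == K) ∘ (fun j => (i, j))) = none := by
        apply List.find?_eq_none.mpr
        intro j _
        simp [Function.comp, pvPr]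
        intro h
        apply hd
        rw [PySem.Int.mod_eq_zero_iff_dvd]
        exact ⟨PySem.List.pyGetD M j 0, h.symm⟩
      rw [this]; rfl

-- B's scan of L equals find? over the row-major pair list
theorem pvGlue (L M : List Int) (K : Int) (hM : M ≠ []) :
    ∀ (is : List Int),
    pvAltSearch K (pvAltFirst M) (is.map (fun i => (i, PySem.List.pyGetD L i 0)))
    = (is.flatMap (fun i => (PySem.List.pyRange 0 (M.length : Int) 1).map (fun j => (i, j)))).find?
        (fun p => pvPr L M p == K) := by
  intro is
  induction is with
  | nil => rfl
  | cons i is ih =>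
    rw [List.map_cons, List.flatMap_cons, List.find?_append, pvRow_eval L M K hM i]
    by_cases hl : PySem.List.pyGetD L i 0 = 0
    · by_cases hK : K = 0
      · simp [pvAltSearch, hl, hK]
      · simp [pvAltSearch, hl, hK, ih]
    · by_cases hd : PySem.Int.mod K (PySem.List.pyGetD L i 0) = 0
      · rw [← pvAltFirst_get? M (PySem.Int.floordiv K (PySem.List.pyGetD L i 0))]
        cases hg : (pvAltFirst M).get? (PySem.Int.floordiv K (PySem.List.pyGetD L i 0)) with
        | some j => simp [pvAltSearch, hl, hd, hg]
        | none => simp [pvAltSearch, hl, hd, hg, ih]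
      · simp [pvAltSearch, hl, hd, ih]

-- the four-extremes closed form equals the running maximum
theorem pvBest_eq (L M : List Int) (hL : L ≠ []) (hM : M ≠ [])
    {loL hiL loM hiM : Int}
    (h1 : PySem.List.min? L (fun x => x) = some loL)
    (h2 : PySem.List.max? L (fun x => x) = some hiL)
    (h3 : PySem.List.min? M (fun x => x) = some loM)
    (h4 : PySem.List.max? M (fun x => x) = some hiM) :
    max (max (max (loL * loM) (loL * hiM)) (hiL * loM)) (hiL * hiM) = pvK L M := by
  have hmemK : ∀ a ∈ L, ∀ b ∈ M, a * b ≤ pvK L M := by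
    intro a ha b hb
    obtain ⟨p, hp, he⟩ := pvPairs_of_mem ha hb
    rw [← he]
    exact pvF_ge_mem L M (pvPairs L M) _ p hp
  have hloL := PySem.List.min?_mem h1
  have hhiL := PySem.List.max?_mem h2
  have hloM := PySem.List.min?_mem h3
  have hhiM := PySem.List.max?_mem h4
  apply le_antisymm
  · exact max_le (max_le (max_le (hmemK _ hloL _ hloM) (hmemK _ hloL _ hhiM))
      (hmemK _ hhiL _ hloM)) (hmemK _ hhiL _ hhiM)
  · obtain ⟨p, hp, he⟩ := pvK_attained hL hM
    rw [he]
    have hb := mem_pvPairs.mp hp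
    have hiRange : PySem.Raise.InRange L.length p.1 := by
      unfold PySem.Raise.InRange; omega
    have hjRange : PySem.Raise.InRange M.length p.2 := by
      unfold PySem.Raise.InRange; omega
    have haL : PySem.List.pyGetD L p.1 0 ∈ L := PySem.List.pyGetD_mem L 0 hiRange
    have hbM : PySem.List.pyGetD M p.2 0 ∈ M := PySem.List.pyGetD_mem M 0 hjRange
    exact pv_prod_le _ _ _ _ _ _
      (PySem.List.min?_isMin h1 _ haL) (PySem.List.max?_isMax h2 _ haL)
      (PySem.List.min?_isMin h3 _ hbM) (PySem.List.max?_isMax h4 _ hbM)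

-- ===== VERDICT (by name: the statement is the Claim_ definition above) =====
theorem find_biggest_mult_spec : Claim_equal_find_biggest_mult := by
  intro L M _ hpre
  obtain ⟨hL, hM⟩ := hpre
  unfold Spec_find_biggest_mult
  obtain ⟨q, hfind, hA⟩ := pvA_char L M hL hM
  rw [hA]
  have e1 : ∃ a, PySem.List.min? L (fun x => x) = some a := by
    cases h : PySem.List.min? L (fun x => x) with
    | some a => exact ⟨a, rfl⟩
    | none => exact absurd ((PySem.List.min?_eq_none_iff _ _).mp h) hL
  have e2 : ∃ a, PySem.List.max? L (fun x => x) = some a := by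
    cases h : PySem.List.max? L (fun x => x) with
    | some a => exact ⟨a, rfl⟩
    | none => exact absurd ((PySem.List.max?_eq_none_iff _ _).mp h) hL
  have e3 : ∃ a, PySem.List.min? M (fun x => x) = some a := by
    cases h : PySem.List.min? M (fun x => x) with
    | some a => exact ⟨a, rfl⟩
    | none => exact absurd ((PySem.List.min?_eq_none_iff _ _).mp h) hM
  have e4 : ∃ a, PySem.List.max? M (fun x => x) = some a := by
    cases h : PySem.List.max? M (fun x => x) with
    | some a => exact ⟨a, rfl⟩
    | none => exact absurd ((PySem.List.max?_eq_none_iff _ _).mp h) hM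
  obtain ⟨loL, h1⟩ := e1
  obtain ⟨hiL, h2⟩ := e2
  obtain ⟨loM, h3⟩ := e3
  obtain ⟨hiM, h4⟩ := e4
  unfold find_biggest_mult_alt
  rw [h1, h2, h3, h4]
  show [q.1, q.2] =
    (let best := max (max (max (loL * loM) (loL * hiM)) (hiL * loM)) (hiL * hiM)
     let first := pvAltFirst M
     match pvAltSearch best first (PySem.List.enumerate L 0) with
     | some (i, j) => [i, j]
     | none => [0, 0])
  simp only
  rw [pvBest_eq L M hL hM h1 h2 h3 h4]
  rw [PySem.List.enumerate_eq_map_pyRange L 0, PySem.List.len_eq]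
  rw [pvGlue L M (pvK L M) hM (PySem.List.pyRange 0 (L.length : Int) 1)]
  have : ((PySem.List.pyRange 0 (L.length : Int) 1).flatMap
      (fun i => (PySem.List.pyRange 0 (M.length : Int) 1).map (fun j => (i, j))))
      = pvPairs L M := rfl
  rw [this, hfind]
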